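-- pv_equiv track=rewrite | github.com/helpfornew/learning-system | server/handlers/schedule.py | get_default_schedule_for_day
-- ===== SOURCE A (Python) =====
-- def get_default_schedule_for_day(day_of_week):
--     """获取某天的默认时间表"""
--     # 0=周日, 1=周一, ..., 6=周六
--
--     # 基础时间表模板
--     base_schedule = [
--         {'start': '07:00', 'end': '07:20', 'title': '起床洗漱', 'desc': '清醒 + 喝水', 'subject': '⏰ 起床', 'tag': 'daily'},
--         {'start': '07:20', 'end': '07:40', 'title': '🧘 晨间拉伸', 'desc': '猫牛式/下犬式/肩颈', 'subject': '锻炼', 'tag': 'exercise'},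
--         {'start': '07:40', 'end': '08:00', 'title': '🔵 英语磨耳朵', 'desc': '纯听，唤醒语感', 'subject': '英语', 'tag': '学习'},
--         {'start': '08:00', 'end': '09:00', 'title': '早餐 + 备菜', 'desc': '做饭/吃 + 准备中午食材', 'subject': '🍽️ 早餐', 'tag': 'daily'},
--         {'start': '09:00', 'end': '10:30', 'title': '🔴 化学分块输入', 'desc': '1 概念 +3 例题 +4 练习', 'subject': '化学', 'tag': '学习'},
--         {'start': '10:30', 'end': '10:50', 'title': '☕ 休息', 'desc': '喝水 + 走动', 'subject': '休息', 'tag': '休息'},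
--         {'start': '10:50', 'end': '12:00', 'title': '🟡 数理刻意练习', 'desc': '模型思维：画示意图 + 边界条件', 'subject': '数学/物理', 'tag': '学习'},
--         {'start': '12:00', 'end': '13:00', 'title': '做饭 + 午餐 + 洗碗', 'desc': '简单烹饪', 'subject': '🍲 午餐', 'tag': 'daily'},
--         {'start': '13:00', 'end': '14:00', 'title': '午休', 'desc': '休息', 'subject': '😴 午休', 'tag': '休息'},
--         {'start': '14:00', 'end': '15:00', 'title': '💻 AI 编程项目', 'desc': 'KDnuggets 文档 + 跑代码', 'subject': 'AI 项目', 'tag': '学习'},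
--         {'start': '15:00', 'end': '15:10', 'title': '📝 项目术语本', 'desc': '记下 3-5 个关键词', 'subject': '英语', 'tag': '学习'},
--         {'start': '15:10', 'end': '16:30', 'title': '🟡 数理错题复盘', 'desc': '盲做→对比→费曼', 'subject': '数理', 'tag': '学习'},
--         {'start': '16:30', 'end': '17:00', 'title': '🧘 微运动 + 深呼吸', 'desc': '靠墙拉伸 + 机动时间', 'subject': '锻炼', 'tag': 'exercise'},
--         {'start': '17:00', 'end': '18:30', 'title': '🟢 政治/语文', 'desc': '背术语 + 选择题 / 文言文精读', 'subject': '政治/语文', 'tag': '学习'},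
--         {'start': '18:30', 'end': '19:30', 'title': '做饭 + 晚餐 + 洗碗', 'desc': '简单烹饪', 'subject': '🍲 晚餐', 'tag': 'daily'},
--         {'start': '19:30', 'end': '20:00', 'title': '彻底放空', 'desc': '无手机', 'subject': '🧘 放空', 'tag': '休息'},
--         {'start': '20:00', 'end': '21:00', 'title': '🟣 化学反刍', 'desc': '检索练习', 'subject': '化学', 'tag': '学习'},
--         {'start': '21:00', 'end': '21:15', 'title': '休息', 'desc': '小憩', 'subject': '✨ 休息', 'tag': '休息'},
--         {'start': '21:15', 'end': '22:00', 'title': '🔵 英语单词质检', 'desc': '只背项目遇到的词 + 高考核心词', 'subject': '英语', 'tag': '学习'},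
--         {'start': '22:00', 'end': '22:20', 'title': '🚿 洗漱', 'desc': '', 'subject': '洗漱', 'tag': 'daily'},
--         {'start': '22:20', 'end': '22:30', 'title': '🧘 冥想', 'desc': '正念/身体扫描', 'subject': '冥想', 'tag': 'exercise'},
--         {'start': '22:30', 'end': '23:00', 'title': '睡觉', 'desc': '22:30 休息', 'subject': '💤 睡觉', 'tag': '休息'},
--     ]
--
--     # 根据星期几调整部分科目
--     if day_of_week == 0:  # 周日
--         # 周测日
--         for item in base_schedule:
--             if '化学分块输入' in item['title']:
--                 item['title'] = '📊 周测·科目①'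
--                 item['desc'] = '周测 70 分钟'
--                 item['subject'] = '周测'
--             elif '数理刻意练习' in item['title']:
--                 item['title'] = '📊 周测·科目②'
--                 item['desc'] = '周测 70 分钟'
--                 item['subject'] = '周测'
--             elif '政治/语文' in item['subject']:
--                 item['title'] = '📊 周测复盘'
--                 item['desc'] = '总结错题'
--                 item['subject'] = '复盘'
--     elif day_of_week in [1, 3, 5]:  # 周一、三、五 - 单日(数学)
--         for item in base_schedule:
--             if '数理刻意练习' in item['title']:
--                 item['title'] = '🟡 数学刻意练习'
--                 item['subject'] = '数学'
--             elif '数理错题复盘' in item['title']: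
--                 item['title'] = '🟡 数学错题复盘'
--                 item['subject'] = '数学'
--             elif item['subject'] == '政治/语文':
--                 item['title'] = '🟢 政治·术语 + 选择题'
--                 item['desc'] = '背 5 术语 +10 选择题'
--                 item['subject'] = '政治'
--     elif day_of_week in [2, 4, 6]:  # 周二、四、六 - 双日(物理)
--         for item in base_schedule:
--             if '数理刻意练习' in item['title']:
--                 item['title'] = '🟡 物理刻意练习'
--                 item['subject'] = '物理'
--             elif '数理错题复盘' in item['title']:
--                 item['title'] = '🟡 物理错题复盘'
--                 item['subject'] = '物理'
--             elif item['subject'] == '政治/语文':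
--                 item['title'] = '🟣 语文·文言文/古诗/素材'
--                 item['desc'] = '文言文精读/古诗鉴赏/作文素材'
--                 item['subject'] = '语文'
--
--     return base_schedule
-- ===== SOURCE B (Python) =====
-- def get_default_schedule_for_day(day_of_week):
--     """获取某天的默认时间表"""
--     # Column-wise construction: six parallel columns zipped into rows; the
--     # weekday-dependent cells are chosen inline by the day group flags.
--     wk = day_of_week == 0               # 周日: 周测日
--     math_day = day_of_week in (1, 3, 5)  # 单日(数学)
--     phys_day = day_of_week in (2, 4, 6)  # 双日(物理)
--
--     starts = ['07:00', '07:20', '07:40', '08:00', '09:00', '10:30', '10:50',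
--               '12:00', '13:00', '14:00', '15:00', '15:10', '16:30', '17:00',
--               '18:30', '19:30', '20:00', '21:00', '21:15', '22:00', '22:20', '22:30']
--     ends = ['07:20', '07:40', '08:00', '09:00', '10:30', '10:50', '12:00',
--             '13:00', '14:00', '15:00', '15:10', '16:30', '17:00', '18:30',
--             '19:30', '20:00', '21:00', '21:15', '22:00', '22:20', '22:30', '23:00']
--     titles = [
--         '起床洗漱', '🧘 晨间拉伸', '🔵 英语磨耳朵', '早餐 + 备菜',
--         '📊 周测·科目①' if wk else '🔴 化学分块输入',
--         '☕ 休息',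
--         '📊 周测·科目②' if wk else '🟡 数学刻意练习' if math_day else '🟡 物理刻意练习' if phys_day else '🟡 数理刻意练习',
--         '做饭 + 午餐 + 洗碗', '午休', '💻 AI 编程项目', '📝 项目术语本',
--         '🟡 数学错题复盘' if math_day else '🟡 物理错题复盘' if phys_day else '🟡 数理错题复盘',
--         '🧘 微运动 + 深呼吸',
--         '📊 周测复盘' if wk else '🟢 政治·术语 + 选择题' if math_day else '🟣 语文·文言文/古诗/素材' if phys_day else '🟢 政治/语文',
--         '做饭 + 晚餐 + 洗碗', '彻底放空', '🟣 化学反刍', '休息',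
--         '🔵 英语单词质检', '🚿 洗漱', '🧘 冥想', '睡觉',
--     ]
--     descs = [
--         '清醒 + 喝水', '猫牛式/下犬式/肩颈', '纯听，唤醒语感', '做饭/吃 + 准备中午食材',
--         '周测 70 分钟' if wk else '1 概念 +3 例题 +4 练习',
--         '喝水 + 走动',
--         '周测 70 分钟' if wk else '模型思维：画示意图 + 边界条件',
--         '简单烹饪', '休息', 'KDnuggets 文档 + 跑代码', '记下 3-5 个关键词',
--         '盲做→对比→费曼', '靠墙拉伸 + 机动时间',
--         '总结错题' if wk else '背 5 术语 +10 选择题' if math_day else '文言文精读/古诗鉴赏/作文素材' if phys_day else '背术语 + 选择题 / 文言文精读',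
--         '简单烹饪', '无手机', '检索练习', '小憩',
--         '只背项目遇到的词 + 高考核心词', '', '正念/身体扫描', '22:30 休息',
--     ]
--     subjects = [
--         '⏰ 起床', '锻炼', '英语', '🍽️ 早餐',
--         '周测' if wk else '化学',
--         '休息',
--         '周测' if wk else '数学' if math_day else '物理' if phys_day else '数学/物理',
--         '🍲 午餐', '😴 午休', 'AI 项目', '英语',
--         '数学' if math_day else '物理' if phys_day else '数理',
--         '锻炼',
--         '复盘' if wk else '政治' if math_day else '语文' if phys_day else '政治/语文',
--         '🍲 晚餐', '🧘 放空', '化学', '✨ 休息',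
--         '英语', '洗漱', '冥想', '💤 睡觉',
--     ]
--     tags = ['daily', 'exercise', '学习', 'daily', '学习', '休息', '学习', 'daily',
--             '休息', '学习', '学习', '学习', 'exercise', '学习', 'daily', '休息',
--             '学习', '休息', '学习', 'daily', 'exercise', '休息']
--
--     return [{'start': s, 'end': e, 'title': t, 'desc': d, 'subject': u, 'tag': g}
--             for s, e, t, d, u, g in zip(starts, ends, titles, descs, subjects, tags)]
-- ===== Notes on version B (the rewrite author's own statement) =====
-- stated objective: alternative
-- what changed: B builds the rows column-wise (six parallel columns zipped into dict rows), choosing the weekday-dependent cells inline via day-group flags, instead of A's build-a-base-list-then-scan-every-row-with-substring/equality-tests-and-mutate passes.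
import Mathlib
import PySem

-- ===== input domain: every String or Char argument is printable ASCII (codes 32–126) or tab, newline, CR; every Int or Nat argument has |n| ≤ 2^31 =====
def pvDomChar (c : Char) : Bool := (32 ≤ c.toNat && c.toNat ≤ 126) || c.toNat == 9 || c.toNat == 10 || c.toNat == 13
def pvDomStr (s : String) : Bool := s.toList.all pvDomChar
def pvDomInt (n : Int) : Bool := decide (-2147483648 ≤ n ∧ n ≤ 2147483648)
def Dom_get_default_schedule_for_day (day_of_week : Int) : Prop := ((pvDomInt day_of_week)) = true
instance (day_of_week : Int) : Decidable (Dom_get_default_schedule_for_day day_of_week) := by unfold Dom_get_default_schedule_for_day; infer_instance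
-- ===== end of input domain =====

-- B builds the schedule column-wise (six parallel columns zipped into rows, weekday-dependent
-- cells chosen inline by day-group flags) instead of A's build-then-scan-and-mutate passes
-- (objective: alternative decomposition, same cost).

-- ===== PORT A =====
-- A builds base_schedule as this literal:
def pvBaseScheduleA : List (List (String × String)) :=
  [[("start", "07:00"), ("end", "07:20"), ("title", "起床洗漱"), ("desc", "清醒 + 喝水"), ("subject", "⏰ 起床"), ("tag", "daily")],
   [("start", "07:20"), ("end", "07:40"), ("title", "🧘 晨间拉伸"), ("desc", "猫牛式/下犬式/肩颈"), ("subject", "锻炼"), ("tag", "exercise")],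
   [("start", "07:40"), ("end", "08:00"), ("title", "🔵 英语磨耳朵"), ("desc", "纯听，唤醒语感"), ("subject", "英语"), ("tag", "学习")],
   [("start", "08:00"), ("end", "09:00"), ("title", "早餐 + 备菜"), ("desc", "做饭/吃 + 准备中午食材"), ("subject", "🍽️ 早餐"), ("tag", "daily")],
   [("start", "09:00"), ("end", "10:30"), ("title", "🔴 化学分块输入"), ("desc", "1 概念 +3 例题 +4 练习"), ("subject", "化学"), ("tag", "学习")],
   [("start", "10:30"), ("end", "10:50"), ("title", "☕ 休息"), ("desc", "喝水 + 走动"), ("subject", "休息"), ("tag", "休息")],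
   [("start", "10:50"), ("end", "12:00"), ("title", "🟡 数理刻意练习"), ("desc", "模型思维：画示意图 + 边界条件"), ("subject", "数学/物理"), ("tag", "学习")],
   [("start", "12:00"), ("end", "13:00"), ("title", "做饭 + 午餐 + 洗碗"), ("desc", "简单烹饪"), ("subject", "🍲 午餐"), ("tag", "daily")],
   [("start", "13:00"), ("end", "14:00"), ("title", "午休"), ("desc", "休息"), ("subject", "😴 午休"), ("tag", "休息")],
   [("start", "14:00"), ("end", "15:00"), ("title", "💻 AI 编程项目"), ("desc", "KDnuggets 文档 + 跑代码"), ("subject", "AI 项目"), ("tag", "学习")],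
   [("start", "15:00"), ("end", "15:10"), ("title", "📝 项目术语本"), ("desc", "记下 3-5 个关键词"), ("subject", "英语"), ("tag", "学习")],
   [("start", "15:10"), ("end", "16:30"), ("title", "🟡 数理错题复盘"), ("desc", "盲做→对比→费曼"), ("subject", "数理"), ("tag", "学习")],
   [("start", "16:30"), ("end", "17:00"), ("title", "🧘 微运动 + 深呼吸"), ("desc", "靠墙拉伸 + 机动时间"), ("subject", "锻炼"), ("tag", "exercise")],
   [("start", "17:00"), ("end", "18:30"), ("title", "🟢 政治/语文"), ("desc", "背术语 + 选择题 / 文言文精读"), ("subject", "政治/语文"), ("tag", "学习")],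
   [("start", "18:30"), ("end", "19:30"), ("title", "做饭 + 晚餐 + 洗碗"), ("desc", "简单烹饪"), ("subject", "🍲 晚餐"), ("tag", "daily")],
   [("start", "19:30"), ("end", "20:00"), ("title", "彻底放空"), ("desc", "无手机"), ("subject", "🧘 放空"), ("tag", "休息")],
   [("start", "20:00"), ("end", "21:00"), ("title", "🟣 化学反刍"), ("desc", "检索练习"), ("subject", "化学"), ("tag", "学习")],
   [("start", "21:00"), ("end", "21:15"), ("title", "休息"), ("desc", "小憩"), ("subject", "✨ 休息"), ("tag", "休息")],
   [("start", "21:15"), ("end", "22:00"), ("title", "🔵 英语单词质检"), ("desc", "只背项目遇到的词 + 高考核心词"), ("subject", "英语"), ("tag", "学习")],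
   [("start", "22:00"), ("end", "22:20"), ("title", "🚿 洗漱"), ("desc", ""), ("subject", "洗漱"), ("tag", "daily")],
   [("start", "22:20"), ("end", "22:30"), ("title", "🧘 冥想"), ("desc", "正念/身体扫描"), ("subject", "冥想"), ("tag", "exercise")],
   [("start", "22:30"), ("end", "23:00"), ("title", "睡觉"), ("desc", "22:30 休息"), ("subject", "💤 睡觉"), ("tag", "休息")]]

-- item['k'] lookup (first match; the key is always present in these literal rows, so "" is never used)
def pvGetField (item : List (String × String)) (k : String) : String :=
  ((item.find? (fun p => p.1 == k)).map Prod.snd).getD ""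
-- item['k'] = v : overwrite in place, position kept (exact here: each row has unique keys)
def pvSetField (item : List (String × String)) (k v : String) : List (String × String) :=
  item.map (fun p => if p.1 == k then (p.1, v) else p)

def get_default_schedule_for_day (day_of_week : Int) : List (List (String × String)) :=
  let base_schedule := pvBaseScheduleA
  if day_of_week = 0 then
    base_schedule.map (fun item =>
      if PySem.Str.isIn "化学分块输入" (pvGetField item "title") then
        pvSetField (pvSetField (pvSetField item "title" "📊 周测·科目①") "desc" "周测 70 分钟") "subject" "周测"
      else if PySem.Str.isIn "数理刻意练习" (pvGetField item "title") then
        pvSetField (pvSetField (pvSetField item "title" "📊 周测·科目②") "desc" "周测 70 分钟") "subject" "周测"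
      else if PySem.Str.isIn "政治/语文" (pvGetField item "subject") then
        pvSetField (pvSetField (pvSetField item "title" "📊 周测复盘") "desc" "总结错题") "subject" "复盘"
      else item)
  else if day_of_week ∈ ([1, 3, 5] : List Int) then
    base_schedule.map (fun item =>
      if PySem.Str.isIn "数理刻意练习" (pvGetField item "title") then
        pvSetField (pvSetField item "title" "🟡 数学刻意练习") "subject" "数学"
      else if PySem.Str.isIn "数理错题复盘" (pvGetField item "title") then
        pvSetField (pvSetField item "title" "🟡 数学错题复盘") "subject" "数学"
      else if pvGetField item "subject" = "政治/语文" then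
        pvSetField (pvSetField (pvSetField item "title" "🟢 政治·术语 + 选择题") "desc" "背 5 术语 +10 选择题") "subject" "政治"
      else item)
  else if day_of_week ∈ ([2, 4, 6] : List Int) then
    base_schedule.map (fun item =>
      if PySem.Str.isIn "数理刻意练习" (pvGetField item "title") then
        pvSetField (pvSetField item "title" "🟡 物理刻意练习") "subject" "物理"
      else if PySem.Str.isIn "数理错题复盘" (pvGetField item "title") then
        pvSetField (pvSetField item "title" "🟡 物理错题复盘") "subject" "物理"
      else if pvGetField item "subject" = "政治/语文" then
        pvSetField (pvSetField (pvSetField item "title" "🟣 语文·文言文/古诗/素材") "desc" "文言文精读/古诗鉴赏/作文素材") "subject" "语文"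
      else item)
  else base_schedule

-- ===== PORT B =====
-- {'start': s, 'end': e, 'title': t, 'desc': d, 'subject': u, 'tag': g}
def pvRow (s e t d u g : String) : List (String × String) :=
  [("start", s), ("end", e), ("title", t), ("desc", d), ("subject", u), ("tag", g)]

-- six-column zip, as Source B's zip(...) comprehension
def pvZipRows : List String → List String → List String → List String → List String → List String → List (List (String × String))
  | s :: ss, e :: es, t :: ts, d :: ds, u :: us, g :: gs =>
      pvRow s e t d u g :: pvZipRows ss es ts ds us gs
  | _, _, _, _, _, _ => []

def get_default_schedule_for_day_alt (day_of_week : Int) : List (List (String × String)) :=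
  let wk : Bool := day_of_week == 0
  let math_day : Bool := day_of_week == 1 || day_of_week == 3 || day_of_week == 5
  let phys_day : Bool := day_of_week == 2 || day_of_week == 4 || day_of_week == 6
  let starts := ["07:00", "07:20", "07:40", "08:00", "09:00", "10:30", "10:50",
                 "12:00", "13:00", "14:00", "15:00", "15:10", "16:30", "17:00",
                 "18:30", "19:30", "20:00", "21:00", "21:15", "22:00", "22:20", "22:30"]
  let ends := ["07:20", "07:40", "08:00", "09:00", "10:30", "10:50", "12:00",
               "13:00", "14:00", "15:00", "15:10", "16:30", "17:00", "18:30",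
               "19:30", "20:00", "21:00", "21:15", "22:00", "22:20", "22:30", "23:00"]
  let titles :=
    ["起床洗漱", "🧘 晨间拉伸", "🔵 英语磨耳朵", "早餐 + 备菜",
     if wk then "📊 周测·科目①" else "🔴 化学分块输入",
     "☕ 休息",
     if wk then "📊 周测·科目②" else if math_day then "🟡 数学刻意练习" else if phys_day then "🟡 物理刻意练习" else "🟡 数理刻意练习",
     "做饭 + 午餐 + 洗碗", "午休", "💻 AI 编程项目", "📝 项目术语本",
     if math_day then "🟡 数学错题复盘" else if phys_day then "🟡 物理错题复盘" else "🟡 数理错题复盘",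
     "🧘 微运动 + 深呼吸",
     if wk then "📊 周测复盘" else if math_day then "🟢 政治·术语 + 选择题" else if phys_day then "🟣 语文·文言文/古诗/素材" else "🟢 政治/语文",
     "做饭 + 晚餐 + 洗碗", "彻底放空", "🟣 化学反刍", "休息",
     "🔵 英语单词质检", "🚿 洗漱", "🧘 冥想", "睡觉"]
  let descs :=
    ["清醒 + 喝水", "猫牛式/下犬式/肩颈", "纯听，唤醒语感", "做饭/吃 + 准备中午食材",
     if wk then "周测 70 分钟" else "1 概念 +3 例题 +4 练习",
     "喝水 + 走动",
     if wk then "周测 70 分钟" else "模型思维：画示意图 + 边界条件",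
     "简单烹饪", "休息", "KDnuggets 文档 + 跑代码", "记下 3-5 个关键词",
     "盲做→对比→费曼", "靠墙拉伸 + 机动时间",
     if wk then "总结错题" else if math_day then "背 5 术语 +10 选择题" else if phys_day then "文言文精读/古诗鉴赏/作文素材" else "背术语 + 选择题 / 文言文精读",
     "简单烹饪", "无手机", "检索练习", "小憩",
     "只背项目遇到的词 + 高考核心词", "", "正念/身体扫描", "22:30 休息"]
  let subjects :=
    ["⏰ 起床", "锻炼", "英语", "🍽️ 早餐",
     if wk then "周测" else "化学",
     "休息",
     if wk then "周测" else if math_day then "数学" else if phys_day then "物理" else "数学/物理",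
     "🍲 午餐", "😴 午休", "AI 项目", "英语",
     if math_day then "数学" else if phys_day then "物理" else "数理",
     "锻炼",
     if wk then "复盘" else if math_day then "政治" else if phys_day then "语文" else "政治/语文",
     "🍲 晚餐", "🧘 放空", "化学", "✨ 休息",
     "英语", "洗漱", "冥想", "💤 睡觉"]
  let tags := ["daily", "exercise", "学习", "daily", "学习", "休息", "学习", "daily",
               "休息", "学习", "学习", "学习", "exercise", "学习", "daily", "休息",
               "学习", "休息", "学习", "daily", "exercise", "休息"]
  pvZipRows starts ends titles descs subjects tags

-- ===== PRECONDITION & SPEC =====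
def Spec_get_default_schedule_for_day (day_of_week : Int) (out : List (List (String × String))) : Prop := out = get_default_schedule_for_day_alt day_of_week
instance (day_of_week : Int) (out : List (List (String × String))) : Decidable (Spec_get_default_schedule_for_day day_of_week out) := by unfold Spec_get_default_schedule_for_day; infer_instance

-- ===== CLAIM =====
def Claim_equal_get_default_schedule_for_day : Prop := ∀ (day_of_week : Int), Dom_get_default_schedule_for_day day_of_week → Spec_get_default_schedule_for_day day_of_week (get_default_schedule_for_day day_of_week)

-- ===== LEMMAS AND PROOFS =====

-- For days outside {0,…,6} A leaves the base schedule untouched and all of B's flags are false.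
theorem pv_other (d : Int) (h0 : d ≠ 0) (h1 : d ≠ 1) (h2 : d ≠ 2) (h3 : d ≠ 3)
    (h4 : d ≠ 4) (h5 : d ≠ 5) (h6 : d ≠ 6) :
    get_default_schedule_for_day d = get_default_schedule_for_day_alt d := by
  have hm135 : d ∉ ([1, 3, 5] : List Int) := by simp [h1, h3, h5]
  have hm246 : d ∉ ([2, 4, 6] : List Int) := by simp [h2, h4, h6]
  have e0 : (d == (0:Int)) = false := by simp [h0]
  have e1 : (d == (1:Int)) = false := by simp [h1]
  have e2 : (d == (2:Int)) = false := by simp [h2]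
  have e3 : (d == (3:Int)) = false := by simp [h3]
  have e4 : (d == (4:Int)) = false := by simp [h4]
  have e5 : (d == (5:Int)) = false := by simp [h5]
  have e6 : (d == (6:Int)) = false := by simp [h6]
  simp only [get_default_schedule_for_day, get_default_schedule_for_day_alt,
    if_neg h0, if_neg hm135, if_neg hm246,
    e0, e1, e2, e3, e4, e5, e6, Bool.or_self,
    Bool.false_eq_true, if_false]
  rfl
-- ===== VERDICT =====
theorem get_default_schedule_for_day_spec : Claim_equal_get_default_schedule_for_day := by
  intro d _
  unfold Spec_get_default_schedule_for_day
  by_cases h0 : d = 0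
  · subst h0; decide
  by_cases h1 : d = 1
  · subst h1; decide
  by_cases h2 : d = 2
  · subst h2; decide
  by_cases h3 : d = 3
  · subst h3; decide
  by_cases h4 : d = 4
  · subst h4; decide
  by_cases h5 : d = 5
  · subst h5; decide
  by_cases h6 : d = 6
  · subst h6; decide
  exact pv_other d h0 h1 h2 h3 h4 h5 h6
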